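-- pv_equiv track=rewrite | github.com/caizefeng/DeltaSpinKit | dskit/utils/incar_helper.py | reduce_array
-- ===== SOURCE A (Python) =====
-- from typing import List
--
-- def reduce_array(string_list: List[str], omit_num: int = 1) -> List[str]:
--     reduced_list = []
--     element_same = string_list[0]
--
--     num_same = 0
--     for i, element in enumerate(string_list):
--         if element_same != element:
--             if num_same <= omit_num:
--                 reduced_list.extend([element_same] * num_same)
--             else:
--                 reduced_list.append(f"{num_same}*{element_same}")
--             element_same = element
--             num_same = 1
--         else:
--             num_same += 1
--
--         if i == len(string_list) - 1:
--             if num_same <= omit_num: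
--                 reduced_list.extend([element_same] * num_same)
--             else:
--                 reduced_list.append(f"{num_same}*{element_same}")
--     return reduced_list
-- ===== SOURCE B (Python) =====
-- from typing import List
--
--
-- def reduce_array(string_list: List[str], omit_num: int = 1) -> List[str]:
--     n = len(string_list)
--     starts = [i for i in range(n) if i == 0 or string_list[i] != string_list[i - 1]]
--     reduced_list = []
--     for start, end in zip(starts, starts[1:] + [n]):
--         count = end - start
--         if count > omit_num:
--             reduced_list.append(f"{count}*{string_list[start]}")
--         else:
--             reduced_list.extend(string_list[start:end])
--     return reduced_list
-- ===== Notes on version B (the rewrite author's own statement) =====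
-- stated objective: alternative
-- what changed: B works in two staged passes over indices: a comprehension first collects the boundary indices where a new run starts, then zip(starts, starts[1:]+[n]) yields (start,end) segment pairs that are encoded by length, instead of A's single pass with a run counter and an in-loop end-of-list flush.
import Mathlib
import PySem

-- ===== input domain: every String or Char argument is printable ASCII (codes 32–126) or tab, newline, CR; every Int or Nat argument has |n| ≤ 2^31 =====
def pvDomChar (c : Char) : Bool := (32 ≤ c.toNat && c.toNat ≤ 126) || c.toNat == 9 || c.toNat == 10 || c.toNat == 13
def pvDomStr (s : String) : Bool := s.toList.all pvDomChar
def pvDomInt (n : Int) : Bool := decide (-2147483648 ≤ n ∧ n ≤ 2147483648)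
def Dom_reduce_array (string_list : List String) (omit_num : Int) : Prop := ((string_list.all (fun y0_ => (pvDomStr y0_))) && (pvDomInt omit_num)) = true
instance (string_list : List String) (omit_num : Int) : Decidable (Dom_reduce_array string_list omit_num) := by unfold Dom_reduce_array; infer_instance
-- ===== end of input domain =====

-- B computes the run boundaries first (a staged index pass), then encodes the
-- (start, end) segments obtained by zipping the boundary list with its shift,
-- instead of A's single pass with a run counter and an in-loop final flush
-- (alternative decomposition; same cost).

-- ===== PORT A =====
-- "extend([e]*n) or append(f'{n}*{e}')", A's flush of a finished run
def flushA (omit_num : Int) (num_same : Int) (element_same : String) : List String :=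
  if num_same ≤ omit_num then List.replicate num_same.toNat element_same
  else [PySem.Int.toStr num_same ++ "*" ++ element_same]

def stepA (len omit_num : Int) (st : List String × String × Int) (p : Int × String) :
    List String × String × Int :=
  let (reduced_list, element_same, num_same) := st
  let (i, element) := p
  let (reduced_list, element_same, num_same) :=
    if element_same ≠ element then
      (reduced_list ++ flushA omit_num num_same element_same, element, (1 : Int))
    else (reduced_list, element_same, num_same + 1)
  if i = len - 1 then
    (reduced_list ++ flushA omit_num num_same element_same, element_same, num_same)
  else (reduced_list, element_same, num_same)

def reduce_array (string_list : List String) (omit_num : Int) : List String :=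
  match string_list.head? with
  | none => []  -- Python raises IndexError here; excluded by Pre_reduce_array
  | some h =>
    ((PySem.List.enumerate string_list 0).foldl
      (stepA (string_list.length : Int) omit_num) ([], h, (0 : Int))).1

-- ===== PORT B =====
-- '[i for i in range(n) if i == 0 or string_list[i] != string_list[i-1]]';
-- both indexings are always in range when evaluated, so getD is exact here.
def startsB (sl : List String) : List Nat :=
  (List.range sl.length).filter (fun i => i == 0 || sl.getD i "" != sl.getD (i - 1) "")

-- body of B's 'for start, end in zip(...)' loop; the slice string_list[start:end]
-- always has 0 ≤ start ≤ end ≤ n, where drop/take is the exact Python slice.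
def segB (sl : List String) (omit_num : Int) (acc : List String) (p : Nat × Nat) :
    List String :=
  let count := p.2 - p.1
  if (count : Int) > omit_num then
    acc ++ [PySem.Int.toStr (count : Int) ++ "*" ++ sl.getD p.1 ""]
  else acc ++ (sl.drop p.1).take count

def reduce_array_alt (string_list : List String) (omit_num : Int) : List String :=
  let n := string_list.length
  let starts := startsB string_list
  (starts.zip (starts.tail ++ [n])).foldl (segB string_list omit_num) []

-- ===== PRECONDITION & SPEC =====
-- A evaluates string_list[0] and raises IndexError on the empty list.
def Pre_reduce_array (string_list : List String) (omit_num : Int) : Prop :=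
  string_list ≠ []
instance (string_list : List String) (omit_num : Int) : Decidable (Pre_reduce_array string_list omit_num) := by unfold Pre_reduce_array; infer_instance

def pvWitness_reduce_array : List String × Int := (["a", "a", "a", "b"], 1)

def Spec_reduce_array (string_list : List String) (omit_num : Int) (out : List String) : Prop := out = reduce_array_alt string_list omit_num
instance (string_list : List String) (omit_num : Int) (out : List String) : Decidable (Spec_reduce_array string_list omit_num out) := by unfold Spec_reduce_array; infer_instance

-- ===== CLAIM (what is proved, stated in full; the proofs are below) =====
def Claim_equal_reduce_array : Prop := ∀ (string_list : List String) (omit_num : Int), Dom_reduce_array string_list omit_num → Pre_reduce_array string_list omit_num → Spec_reduce_array string_list omit_num (reduce_array string_list omit_num)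

-- ===== LEMMAS AND PROOFS =====

-- ---- common intermediate: consecutive runs (element, count) and their encoding ----
def groupRuns : List String → List (String × Nat)
  | [] => []
  | x :: xs =>
    match groupRuns xs with
    | [] => [(x, 1)]
    | (y, n) :: r => if x = y then (y, n + 1) :: r else (x, 1) :: (y, n) :: r

def encB (omit_num : Int) (p : String × Nat) : List String :=
  if (p.2 : Int) > omit_num then [PySem.Int.toStr (p.2 : Int) ++ "*" ++ p.1]
  else List.replicate p.2 p.1

-- ---- A-side: A's loop computes encB over groupRuns ----
def loopA (omit_num : Int) : List String → String → Int → List String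
  | [], _, _ => []
  | [x], es, ns =>
      if es ≠ x then flushA omit_num ns es ++ flushA omit_num 1 x
      else flushA omit_num (ns + 1) es
  | x :: y :: t, es, ns =>
      if es ≠ x then flushA omit_num ns es ++ loopA omit_num (y :: t) x 1
      else loopA omit_num (y :: t) es (ns + 1)

def castRuns (rs : List (String × Nat)) : List (String × Int) :=
  rs.map (fun p => (p.1, (p.2 : Int)))

def absorb (es : String) (ns : Int) : List (String × Int) → List (String × Int)
  | [] => [(es, ns)]
  | (y, m) :: r => if y = es then (es, ns + m) :: r else (es, ns) :: (y, m) :: r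

def encA (omit_num : Int) (rs : List (String × Int)) : List String :=
  rs.flatMap (fun p => flushA omit_num p.2 p.1)

theorem groupRuns_cons (x : String) (xs : List String) :
    groupRuns (x :: xs) =
      match groupRuns xs with
      | [] => [(x, 1)]
      | (y, n) :: r => if x = y then (y, n + 1) :: r else (x, 1) :: (y, n) :: r := rfl

theorem groupRuns_head (y : String) (t : List String) :
    ∃ m r, groupRuns (y :: t) = (y, m) :: r := by
  induction t generalizing y with
  | nil => exact ⟨1, [], rfl⟩
  | cons z t ih =>
    obtain ⟨m, r, h⟩ := ih z
    rw [groupRuns_cons, h]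
    by_cases hy : y = z
    · subst hy; exact ⟨m + 1, r, by simp⟩
    · exact ⟨1, (z, m) :: r, by simp [hy]⟩

theorem loopA_eq_encA (omit_num : Int) (x : String) (t : List String)
    (es : String) (ns : Int) :
    loopA omit_num (x :: t) es ns =
      encA omit_num (absorb es ns (castRuns (groupRuns (x :: t)))) := by
  induction t generalizing x es ns with
  | nil =>
    by_cases h : es = x
    · subst h
      simp [loopA, groupRuns, castRuns, absorb, encA]
    · simp [loopA, groupRuns, castRuns, absorb, h, Ne.symm h, encA]
  | cons y t ih =>
    obtain ⟨m, r, hgr⟩ := groupRuns_head y t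
    by_cases h : es = x
    · subst h
      rw [show loopA omit_num (es :: y :: t) es ns = loopA omit_num (y :: t) es (ns + 1) by
            simp [loopA]]
      rw [ih y es (ns + 1)]
      congr 1
      rw [groupRuns_cons (x := es) (xs := y :: t), hgr]
      by_cases hxy : es = y
      · subst hxy
        simp [castRuns, absorb]
        omega
      · simp [castRuns, absorb, hxy, Ne.symm hxy]
    · rw [show loopA omit_num (x :: y :: t) es ns
            = flushA omit_num ns es ++ loopA omit_num (y :: t) x 1 by simp [loopA, h]]
      rw [ih y x 1]
      have habs : absorb x 1 (castRuns (groupRuns (y :: t)))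
          = castRuns (groupRuns (x :: y :: t)) := by
        rw [groupRuns_cons (x := x) (xs := y :: t), hgr]
        by_cases hxy : x = y
        · subst hxy
          simp [castRuns, absorb]
          omega
        · simp [castRuns, absorb, hxy, Ne.symm hxy]
      rw [habs]
      obtain ⟨m', r', hgr'⟩ := groupRuns_head x (y :: t)
      rw [hgr']
      simp [castRuns, absorb, Ne.symm h, encA]

theorem foldl_stepA (omit_num : Int) (len : Int) (t : List String) :
    ∀ (k : Int) (rl : List String) (es : String) (ns : Int),
      t ≠ [] → k + (t.length : Int) = len →
      ((PySem.List.enumerate t k).foldl (stepA len omit_num) (rl, es, ns)).1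
        = rl ++ loopA omit_num t es ns := by
  induction t with
  | nil => intro _ _ _ _ h; exact absurd rfl h
  | cons x t ih =>
    intro k rl es ns _ hk
    rw [PySem.List.enumerate_cons, List.foldl_cons]
    cases t with
    | nil =>
      have hlast : k = len - 1 := by simp at hk; omega
      by_cases h : es = x
      · subst h
        simp [stepA, hlast, PySem.List.enumerate_nil, loopA]
      · simp [stepA, h, hlast, PySem.List.enumerate_nil, loopA]
    | cons y u =>
      have hnl : ¬ (k = len - 1) := by simp at hk ⊢; omega
      have hk' : (k + 1) + ((y :: u).length : Int) = len := by simp at hk ⊢; omega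
      by_cases h : es = x
      · subst h
        rw [show stepA len omit_num (rl, es, ns) (k, es) = (rl, es, ns + 1) by
              simp [stepA, hnl]]
        rw [ih (k + 1) rl es (ns + 1) (by simp) hk']
        simp [loopA]
      · rw [show stepA len omit_num (rl, es, ns) (k, x)
              = (rl ++ flushA omit_num ns es, x, 1) by simp [stepA, h, hnl]]
        rw [ih (k + 1) (rl ++ flushA omit_num ns es) x 1 (by simp) hk']
        simp [loopA, h]

theorem encA_castRuns (omit_num : Int) (rs : List (String × Nat)) :
    encA omit_num (castRuns rs) = rs.flatMap (encB omit_num) := by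
  induction rs with
  | nil => simp [encA, castRuns]
  | cons p rs ih =>
    obtain ⟨e, m⟩ := p
    have : flushA omit_num (m : Int) e = encB omit_num (e, m) := by
      unfold flushA encB
      rcases lt_or_ge omit_num (m : Int) with h | h
      · simp [h, not_le.mpr h]
      · simp [h, not_lt.mpr h]
    simp only [castRuns, List.map_cons, encA, List.flatMap_cons] at *
    rw [this, ih]

theorem reduce_array_eq_runs (sl : List String) (omit_num : Int) (h : sl ≠ []) :
    reduce_array sl omit_num = (groupRuns sl).flatMap (encB omit_num) := by
  cases sl with
  | nil => exact absurd rfl h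
  | cons x t =>
    unfold reduce_array
    simp only [List.head?]
    rw [foldl_stepA omit_num ((x :: t).length : Int) (x :: t) 0 [] x 0 (by simp) (by simp)]
    rw [loopA_eq_encA]
    obtain ⟨m, r, hgr⟩ := groupRuns_head x t
    rw [← encA_castRuns]
    simp [hgr, castRuns, absorb]

-- ---- B-side: the boundary/segment construction computes encB over groupRuns ----
def repRuns (rs : List (String × Nat)) : List String :=
  rs.flatMap (fun p => List.replicate p.2 p.1)

def segF (sl : List String) (omit_num : Int) (p : Nat × Nat) : List String :=
  if ((p.2 - p.1 : Nat) : Int) > omit_num then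
    [PySem.Int.toStr ((p.2 - p.1 : Nat) : Int) ++ "*" ++ sl.getD p.1 ""]
  else (sl.drop p.1).take (p.2 - p.1)

def segsOf (sl : List String) (omit_num : Int) : List String :=
  ((startsB sl).zip ((startsB sl).tail ++ [sl.length])).flatMap (segF sl omit_num)

theorem foldl_segB (sl : List String) (omit_num : Int) (l : List (Nat × Nat))
    (acc : List String) :
    l.foldl (segB sl omit_num) acc = acc ++ l.flatMap (segF sl omit_num) := by
  have : segB sl omit_num = fun acc p => acc ++ segF sl omit_num p := by
    funext acc p
    unfold segB segF
    dsimp only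
    split_ifs <;> rfl
  rw [this, PySem.List.foldl_append_eq_flatMap]

theorem reduce_array_alt_eq_segsOf (sl : List String) (omit_num : Int) :
    reduce_array_alt sl omit_num = segsOf sl omit_num := by
  unfold reduce_array_alt segsOf
  rw [foldl_segB]
  simp

theorem groupRuns_flatten (sl : List String) : repRuns (groupRuns sl) = sl := by
  induction sl with
  | nil => rfl
  | cons x xs ih =>
    cases xs with
    | nil => simp [groupRuns, repRuns]
    | cons y t =>
      obtain ⟨m, r, hgr⟩ := groupRuns_head y t
      rw [groupRuns_cons, hgr]
      rw [hgr] at ih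
      dsimp only
      by_cases hxy : x = y
      · subst hxy
        rw [if_pos rfl]
        simp only [repRuns, List.flatMap_cons] at ih ⊢
        rw [List.replicate_succ, List.cons_append, ih]
      · rw [if_neg hxy]
        simp only [repRuns, List.flatMap_cons] at ih ⊢
        rw [List.replicate_one, List.singleton_append, ih]

theorem groupRuns_pos (sl : List String) : ∀ p ∈ groupRuns sl, 0 < p.2 := by
  induction sl with
  | nil => simp [groupRuns]
  | cons x xs ih =>
    rw [groupRuns_cons]
    cases hgr : groupRuns xs with
    | nil => simp
    | cons q r =>
      obtain ⟨y, n⟩ := q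
      rw [hgr] at ih
      dsimp only
      by_cases hxy : x = y
      · rw [if_pos hxy]
        intro p hp
        rcases List.mem_cons.mp hp with h | h
        · subst h; simp
        · exact ih p (List.mem_cons_of_mem _ h)
      · rw [if_neg hxy]
        intro p hp
        rcases List.mem_cons.mp hp with h | h
        · subst h; simp
        · exact ih p h

-- adjacent runs carry distinct elements
def sepRuns : List (String × Nat) → Prop
  | [] => True
  | [_] => True
  | p :: q :: r => p.1 ≠ q.1 ∧ sepRuns (q :: r)

theorem sepRuns_tail (p : String × Nat) (rs : List (String × Nat))
    (h : sepRuns (p :: rs)) : sepRuns rs := by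
  cases rs with
  | nil => trivial
  | cons q t => exact h.2

theorem groupRuns_sep (sl : List String) : sepRuns (groupRuns sl) := by
  induction sl with
  | nil => trivial
  | cons x xs ih =>
    rw [groupRuns_cons]
    cases hgr : groupRuns xs with
    | nil => trivial
    | cons q r =>
      obtain ⟨y, n⟩ := q
      rw [hgr] at ih
      dsimp only
      by_cases hxy : x = y
      · rw [if_pos hxy]
        cases r with
        | nil => trivial
        | cons q2 r2 => exact ⟨ih.1, ih.2⟩
      · rw [if_neg hxy]
        exact ⟨hxy, ih⟩

theorem repRuns_head (e2 : String) (c2 : Nat) (t : List (String × Nat)) (hc : 0 < c2) :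
    (repRuns ((e2, c2) :: t)).head? = some e2 := by
  obtain ⟨k, rfl⟩ : ∃ k, c2 = k + 1 := ⟨c2 - 1, by omega⟩
  simp [repRuns, List.replicate_succ]

theorem startsB_cons_eq (x : String) (xs : List String) :
    startsB (x :: xs) =
      0 :: ((List.range xs.length).map (· + 1)).filter
        (fun i => i == 0 || (x :: xs).getD i "" != (x :: xs).getD (i - 1) "") := by
  unfold startsB
  rw [List.length_cons, List.range_succ_eq_map, List.filter_cons_of_pos (by simp)]

theorem getD_rep_left (e : String) (c : Nat) (rest : List String) (i : Nat) (h : i < c) :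
    (List.replicate c e ++ rest).getD i "" = e := by
  rw [List.getD_eq_getElem?_getD, List.getElem?_append_left (by simpa using h)]
  simp [h]

theorem getD_rep_right (e : String) (c : Nat) (rest : List String) (j : Nat) :
    (List.replicate c e ++ rest).getD (c + j) "" = rest.getD j "" := by
  rw [List.getD_eq_getElem?_getD, List.getElem?_append_right (by simp)]
  simp [List.getD_eq_getElem?_getD]

theorem startsB_rep_append (e : String) (c : Nat) (rest : List String) (hc : 0 < c)
    (hh : ∀ y ∈ rest.head?, y ≠ e) :
    startsB (List.replicate c e ++ rest) = 0 :: (startsB rest).map (c + ·) := by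
  unfold startsB
  have hlen : (List.replicate c e ++ rest).length = c + rest.length := by simp
  rw [hlen, List.range_add, List.filter_append, List.filter_map]
  have h1 : (List.range c).filter
      (fun i => i == 0 || (List.replicate c e ++ rest).getD i "" != (List.replicate c e ++ rest).getD (i - 1) "") = [0] := by
    obtain ⟨k, rfl⟩ : ∃ k, c = k + 1 := ⟨c - 1, by omega⟩
    rw [List.range_succ_eq_map, List.filter_cons_of_pos (by simp), List.filter_map]
    have h0 : (List.range k).filter
        ((fun i => i == 0 || (List.replicate (k + 1) e ++ rest).getD i "" != (List.replicate (k + 1) e ++ rest).getD (i - 1) "") ∘ (· + 1)) = [] := by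
      apply List.filter_eq_nil_iff.mpr
      intro i hi
      have hik : i < k := List.mem_range.mp hi
      simp only [Function.comp_apply]
      rw [getD_rep_left e (k + 1) rest (i + 1) (by omega),
          show i + 1 - 1 = i by omega,
          getD_rep_left e (k + 1) rest i (by omega)]
      simp
    rw [h0]
    simp
  rw [h1, List.singleton_append]
  congr 1
  apply congrArg
  apply List.filter_congr
  intro j2 hj2m
  have hj2 : j2 < rest.length := List.mem_range.mp hj2m
  simp only [Function.comp_apply]
  have hne : (c + j2 == 0) = false := by simp; omega
  rw [hne, Bool.false_or, getD_rep_right e c rest j2]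
  cases j2 with
  | zero =>
    have hr : rest ≠ [] := by intro h; rw [h] at hj2; simp at hj2
    obtain ⟨r0, rt, rfl⟩ := List.exists_cons_of_ne_nil hr
    have h0 : r0 ≠ e := hh r0 (by simp)
    rw [show c + 0 - 1 = c - 1 by omega]
    rw [getD_rep_left e c (r0 :: rt) (c - 1) (by omega)]
    simp [h0]
  | succ j3 =>
    rw [show c + (j3 + 1) - 1 = c + j3 by omega, getD_rep_right e c rest j3]
    simp

theorem segF_shift (sl2 : List String) (e : String) (c : Nat) (omit_num : Int)
    (p : Nat × Nat) :
    segF (List.replicate c e ++ sl2) omit_num (c + p.1, c + p.2) = segF sl2 omit_num p := by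
  unfold segF
  have hcount : c + p.2 - (c + p.1) = p.2 - p.1 := by omega
  have hdrop : (List.replicate c e ++ sl2).drop (c + p.1) = sl2.drop p.1 := by
    rw [List.drop_append]
    simp
  simp only [hcount, hdrop, getD_rep_right]

theorem zip_shift (c m : Nat) (T : List Nat) :
    (0 :: ((0 :: T).map (c + ·))).zip ((0 :: T).map (c + ·) ++ [c + m]) =
      (0, c) :: ((0 :: T).zip (T ++ [m])).map (Prod.map (c + ·) (c + ·)) := by
  simp only [List.map_cons, Nat.add_zero, List.cons_append, List.zip_cons_cons]
  congr 1
  rw [show (c :: T.map (c + ·) : List Nat) = (0 :: T).map (c + ·) by simp,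
      show T.map (c + ·) ++ [c + m] = (T ++ [m]).map (c + ·) by simp,
      List.zip_map]

theorem segsOf_repRuns (omit_num : Int) (rs : List (String × Nat))
    (hsep : sepRuns rs) (hpos : ∀ p ∈ rs, 0 < p.2) :
    segsOf (repRuns rs) omit_num = rs.flatMap (encB omit_num) := by
  induction rs with
  | nil => simp [segsOf, repRuns, startsB, segF]
  | cons p rs ih =>
    obtain ⟨e, c⟩ := p
    have hc : 0 < c := hpos (e, c) (by simp)
    have hrep : repRuns ((e, c) :: rs) = List.replicate c e ++ repRuns rs := by
      simp [repRuns]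
    have hh : ∀ y ∈ (repRuns rs).head?, y ≠ e := by
      cases rs with
      | nil => simp [repRuns]
      | cons q t =>
        rw [show q = (q.1, q.2) from rfl, repRuns_head q.1 q.2 t (hpos q (by simp))]
        intro y hy
        rw [Option.mem_some_iff] at hy
        subst hy
        exact fun h => hsep.1 h.symm
    have hpos2 : ∀ p ∈ rs, 0 < p.2 := fun p hp => hpos p (List.mem_cons_of_mem _ hp)
    have ih2 := ih (sepRuns_tail _ _ hsep) hpos2
    rw [hrep]
    unfold segsOf
    rw [startsB_rep_append e c (repRuns rs) hc hh]
    have hseg0 : segF (List.replicate c e ++ repRuns rs) omit_num (0, c) = encB omit_num (e, c) := by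
      unfold segF encB
      simp only [Nat.sub_zero, List.drop_zero]
      rw [getD_rep_left e c (repRuns rs) 0 hc]
      rw [List.take_append]
      simp
    cases rs with
    | nil =>
      simp only [repRuns, List.flatMap_nil, List.append_nil] at hseg0 ⊢
      rw [show startsB [] = [] from rfl]
      simp only [List.map_nil, List.tail_cons, List.nil_append, List.length_append,
        List.length_replicate, List.length_nil, Nat.add_zero]
      rw [show List.zip [0] [c] = [(0, c)] from rfl]
      rw [List.flatMap_cons, List.flatMap_nil, List.append_nil, List.flatMap_cons,
        List.flatMap_nil, List.append_nil]
      exact hseg0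
    | cons q t =>
      obtain ⟨h0, L2, hL⟩ : ∃ h0 L2, repRuns (q :: t) = h0 :: L2 := by
        cases hrr : repRuns (q :: t) with
        | nil =>
          have := repRuns_head q.1 q.2 t (hpos2 q (by simp))
          rw [show (q.1, q.2) = q from rfl, hrr] at this
          simp at this
        | cons a b => exact ⟨a, b, rfl⟩
      obtain ⟨T, hT⟩ : ∃ T, startsB (repRuns (q :: t)) = 0 :: T := by
        rw [hL]; exact ⟨_, startsB_cons_eq h0 L2⟩
      rw [hT, List.tail_cons]
      rw [show (List.replicate c e ++ repRuns (q :: t)).length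
            = c + (repRuns (q :: t)).length by simp]
      rw [zip_shift c (repRuns (q :: t)).length T]
      rw [List.flatMap_cons, hseg0, List.flatMap_map]
      have hfun : (fun p => segF (List.replicate c e ++ repRuns (q :: t)) omit_num
            (Prod.map (c + ·) (c + ·) p)) = segF (repRuns (q :: t)) omit_num := by
        funext p
        exact segF_shift (repRuns (q :: t)) e c omit_num p
      rw [hfun]
      unfold segsOf at ih2
      rw [hT, List.tail_cons] at ih2
      rw [ih2]
      simp

theorem reduce_array_spec : Claim_equal_reduce_array := by
  intro sl omit_num _ hpre
  unfold Spec_reduce_array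
  rw [reduce_array_eq_runs sl omit_num hpre, reduce_array_alt_eq_segsOf]
  have h := segsOf_repRuns omit_num (groupRuns sl) (groupRuns_sep sl) (groupRuns_pos sl)
  rw [groupRuns_flatten] at h
  rw [h]
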